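-- pv_equiv track=rewrite | github.com/heyhenry/python-problemsolving | 2025/January/ai_asked/fizz_buzz_twist.py | fizz_buzz_twist
-- ===== SOURCE A (Python) =====
-- def is_prime(n : int):
--     if n == 1:
--         return False
--     for i in range(2, n):
--         if n % i == 0:
--             return False
--     return True
--
-- def fizz_buzz_twist(n : int) -> list[str]:
--     results = []
--     for i in range(1, n+1):
--         if is_prime(i):
--             results.append('Prime')
--         elif i % 3 == 0 and i % 5 == 0:
--             results.append('FizzBuzz')
--         elif i % 3 == 0:
--             results.append('Fizz')
--         elif i % 5 == 0:
--             results.append('Buzz')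
--         else:
--             results.append(str(i))
--     return results
-- ===== SOURCE B (Python) =====
-- def _label(i: int) -> str:
--     if i >= 2:
--         d = 2
--         while d * d <= i:
--             if i % d == 0:
--                 break
--             d += 1
--         else:
--             return 'Prime'
--     if i % 15 == 0:
--         return 'FizzBuzz'
--     if i % 3 == 0:
--         return 'Fizz'
--     if i % 5 == 0:
--         return 'Buzz'
--     return str(i)
--
-- def fizz_buzz_twist(n: int) -> list[str]:
--     return [_label(i) for i in range(1, n + 1)]
-- ===== Notes on version B (the rewrite author's own statement) =====
-- stated objective: faster
-- what changed: Primality is tested by trial division only up to sqrt(i) with an early break (instead of scanning all of 2..i-1), the FizzBuzz test uses i%15, and the list is built by mapping a single label helper over the range.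
import Mathlib
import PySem

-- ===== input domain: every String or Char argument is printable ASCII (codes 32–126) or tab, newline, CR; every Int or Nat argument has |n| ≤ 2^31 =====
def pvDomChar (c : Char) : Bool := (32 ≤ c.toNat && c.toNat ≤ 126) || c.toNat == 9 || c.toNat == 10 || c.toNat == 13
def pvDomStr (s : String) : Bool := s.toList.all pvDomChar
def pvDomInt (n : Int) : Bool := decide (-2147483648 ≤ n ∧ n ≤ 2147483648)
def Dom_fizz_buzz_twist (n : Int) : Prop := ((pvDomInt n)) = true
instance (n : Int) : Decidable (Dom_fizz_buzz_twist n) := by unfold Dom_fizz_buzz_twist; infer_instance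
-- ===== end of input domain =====

-- B replaces A's 2..i-1 divisor scan by trial division up to sqrt(i) with early exit (faster), and uses i%15 for FizzBuzz.

-- ===== PORT A =====
-- is_prime: 'if n == 1: return False; for i in range(2, n): if n % i == 0: return False; return True'
def is_prime (n : Int) : Bool :=
  if n == 1 then false
  else (PySem.List.pyRange 2 n 1).all (fun i => !(PySem.Int.mod n i == 0))

def fizz_buzz_twist (n : Int) : List String :=
  (PySem.List.pyRange 1 (n + 1) 1).foldl (fun results i =>
    results ++ [if is_prime i then "Prime"
      else if PySem.Int.mod i 3 == 0 && PySem.Int.mod i 5 == 0 then "FizzBuzz"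
      else if PySem.Int.mod i 3 == 0 then "Fizz"
      else if PySem.Int.mod i 5 == 0 then "Buzz"
      else PySem.Int.toStr i]) []

-- ===== PORT B =====
-- the 'while d * d <= i: if i % d == 0: break; d += 1  else: return Prime' loop: true ↔ the loop fell through (no divisor found)
def trialB (i d : Int) : Bool :=
  if d * d ≤ i then
    if PySem.Int.mod i d == 0 then false else trialB i (d + 1)
  else true
termination_by (i + 1 - d).toNat
decreasing_by
  have hd : d ≤ i := by nlinarith [sq_nonneg (d - 1)]
  omega

def _label (i : Int) : String :=
  if 2 ≤ i ∧ trialB i 2 = true then "Prime"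
  else if PySem.Int.mod i 15 == 0 then "FizzBuzz"
  else if PySem.Int.mod i 3 == 0 then "Fizz"
  else if PySem.Int.mod i 5 == 0 then "Buzz"
  else PySem.Int.toStr i

def fizz_buzz_twist_alt (n : Int) : List String :=
  (PySem.List.pyRange 1 (n + 1) 1).map _label

-- ===== PRECONDITION & SPEC =====
def Spec_fizz_buzz_twist (n : Int) (out : List String) : Prop := out = fizz_buzz_twist_alt n
instance (n : Int) (out : List String) : Decidable (Spec_fizz_buzz_twist n out) := by unfold Spec_fizz_buzz_twist; infer_instance

-- ===== CLAIM (what is proved, stated in full; the proofs are below) =====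
def Claim_equal_fizz_buzz_twist : Prop := ∀ (n : Int), Dom_fizz_buzz_twist n → Spec_fizz_buzz_twist n (fizz_buzz_twist n)

-- ===== LEMMAS AND PROOFS =====

-- A's scan over 2..i-1 finds no divisor iff no d with 2 ≤ d < i divides i
lemma is_prime_iff (i : Int) (hi : i ≠ 1) :
    is_prime i = true ↔ ∀ d : Int, 2 ≤ d → d < i → ¬ d ∣ i := by
  simp [is_prime, hi, PySem.List.mem_pyRange_one, PySem.Int.mod_eq_zero_iff_dvd]

-- B's while loop falls through iff no e ≥ d with e*e ≤ i divides i (for d ≥ 2)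
lemma trialB_iff (i d : Int) (hd : 2 ≤ d) :
    trialB i d = true ↔ ∀ e : Int, d ≤ e → e * e ≤ i → ¬ e ∣ i := by
  revert hd
  induction d using trialB.induct (i := i) with
  | case1 d hle hdvd =>
    intro hd
    rw [beq_iff_eq, PySem.Int.mod_eq_zero_iff_dvd] at hdvd
    rw [trialB]
    rw [if_pos hle, if_pos (by simp [PySem.Int.mod_eq_zero_iff_dvd]; exact hdvd)]
    simp only [Bool.false_eq_true, false_iff]
    intro h
    exact h d le_rfl hle hdvd
  | case2 d hle hdvd ih =>
    intro hd
    rw [beq_iff_eq, PySem.Int.mod_eq_zero_iff_dvd] at hdvd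
    rw [trialB]
    rw [if_pos hle, if_neg (by simp [PySem.Int.mod_eq_zero_iff_dvd]; exact hdvd), ih (by omega)]
    constructor
    · intro h e hde hei
      rcases eq_or_lt_of_le hde with rfl | hlt
      · exact hdvd
      · exact h e (by omega) hei
    · intro h e hde hei; exact h e (by omega) hei
  | case3 d hle =>
    intro hd
    rw [trialB, if_neg hle]
    simp only [true_iff]
    intro e hde hei hdvd
    exact hle (le_trans (by nlinarith) hei)

-- a proper divisor d of i yields a divisor e with e*e ≤ i
lemma small_divisor (i d : Int) (h2 : 2 ≤ d) (hlt : d < i) (hdvd : d ∣ i) :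
    ∃ e : Int, 2 ≤ e ∧ e * e ≤ i ∧ e ∣ i := by
  rcases hdvd with ⟨c, rfl⟩
  have hi : 0 < d * c := by nlinarith
  have hc : 0 < c := by nlinarith
  by_cases h : d * d ≤ d * c
  · exact ⟨d, h2, h, ⟨c, rfl⟩⟩
  · push Not at h
    have hcd : c < d := by nlinarith
    have hc2 : 2 ≤ c := by nlinarith
    exact ⟨c, hc2, by nlinarith, ⟨d, mul_comm d c⟩⟩

-- for i ≥ 1, A's primality scan agrees with B's sqrt trial division
lemma prime_equiv (i : Int) (hi : 1 ≤ i) :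
    is_prime i = true ↔ (2 ≤ i ∧ trialB i 2 = true) := by
  rcases eq_or_lt_of_le hi with rfl | h1
  · decide
  · have h2 : 2 ≤ i := by omega
    simp only [h2, true_and]
    rw [is_prime_iff i (by omega), trialB_iff i 2 le_rfl]
    constructor
    · intro h e he2 hee hedvd
      exact h e he2 (by nlinarith) hedvd
    · intro h d hd2 hdlt hdvd
      rcases small_divisor i d hd2 hdlt hdvd with ⟨e, he2, hee, hedvd⟩
      exact h e he2 hee hedvd

-- i % 15 == 0 iff i % 3 == 0 and i % 5 == 0
lemma mod15_iff (i : Int) :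
    PySem.Int.mod i 15 = 0 ↔ (PySem.Int.mod i 3 = 0 ∧ PySem.Int.mod i 5 = 0) := by
  simp only [PySem.Int.mod_eq_zero_iff_dvd]
  omega

-- per-element agreement: A's branch value = B's label, for i ≥ 1
lemma label_eq (i : Int) (hi : 1 ≤ i) :
    (if is_prime i then "Prime"
      else if PySem.Int.mod i 3 == 0 && PySem.Int.mod i 5 == 0 then "FizzBuzz"
      else if PySem.Int.mod i 3 == 0 then "Fizz"
      else if PySem.Int.mod i 5 == 0 then "Buzz"
      else PySem.Int.toStr i) = _label i := by
  unfold _label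
  by_cases hp : 2 ≤ i ∧ trialB i 2 = true
  · rw [if_pos ((prime_equiv i hi).2 hp), if_pos hp]
  · rw [if_neg (by simp [(prime_equiv i hi).not.2 hp]), if_neg hp]
    simp only [Bool.and_eq_true, beq_iff_eq, mod15_iff]

-- ===== VERDICT (by name: the statement is the Claim_ definition above) =====
theorem fizz_buzz_twist_spec : Claim_equal_fizz_buzz_twist := by
  intro n _
  unfold Spec_fizz_buzz_twist fizz_buzz_twist fizz_buzz_twist_alt
  rw [PySem.List.foldl_append_singleton_eq_map]
  apply List.map_congr_left
  intro i hi
  rw [PySem.List.mem_pyRange_one] at hi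
  exact label_eq i hi.1
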